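-- pv_equiv track=rewrite | github.com/allerulez/pythonLabs | ok/uppgift3a.py | split_rec
-- ===== SOURCE A (Python) =====
-- def split_rec(string):
--     """
--     Given a string, returns two new strings, where the first contains all lowercase letters, "." and "_"
--     and the second contains all uppercase letters, " " and "|", recursively
--     """
--     if not string:
--         return "",""
--     left,right = split_rec(string[1:])
--     if string[0].islower() or string[0] in "_.":
--         return string[0] + left, right
--     elif string[0].isupper() or string[0] in " |":
--         return left, string[0] + right
--     return left, right
-- ===== SOURCE B (Python) =====
-- def split_rec(string):
--     """
--     Given a string, returns two new strings, where the first contains all lowercase letters, "." and "_"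
--     and the second contains all uppercase letters, " " and "|" (two filter passes).
--     """
--     def low_ok(c):
--         return c.islower() or c in "_."
--     def up_ok(c):
--         return c.isupper() or c in " |"
--     return ("".join(filter(low_ok, string)),
--             "".join(c for c in string if not low_ok(c) and up_ok(c)))
-- ===== Notes on version B (the rewrite author's own statement) =====
-- stated objective: simpler
-- what changed: Replaces the O(n^2) recursion that rebuilds both strings by character-prepending with two independent linear filter passes over the string (second pass keeps A's branch priority via 'not low_ok and up_ok').
import Mathlib
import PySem

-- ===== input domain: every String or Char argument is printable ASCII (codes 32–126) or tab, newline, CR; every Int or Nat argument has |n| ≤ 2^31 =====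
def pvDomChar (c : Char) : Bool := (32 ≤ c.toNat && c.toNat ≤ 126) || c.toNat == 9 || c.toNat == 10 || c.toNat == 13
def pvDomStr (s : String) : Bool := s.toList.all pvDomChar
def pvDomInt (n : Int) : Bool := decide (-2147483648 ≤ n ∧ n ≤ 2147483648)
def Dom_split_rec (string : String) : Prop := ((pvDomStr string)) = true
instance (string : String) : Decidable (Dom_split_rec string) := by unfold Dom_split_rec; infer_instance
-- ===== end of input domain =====

-- B replaces A's recursion by two independent filter passes over the string; simpler and linear.

-- ===== PORT A =====
-- A's recursion on string[1:], transcribed over the character list.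
def splitRecAuxA : List Char → List Char × List Char
  | [] => ([], [])
  | c :: rest =>
    let lr := splitRecAuxA rest
    if PySem.Chars.islower c || (c = '_' || c = '.') then (c :: lr.1, lr.2)
    else if PySem.Chars.isupper c || (c = ' ' || c = '|') then (lr.1, c :: lr.2)
    else lr

def split_rec (string : String) : String × String :=
  let lr := splitRecAuxA string.toList
  (String.ofList lr.1, String.ofList lr.2)

-- ===== PORT B =====
-- B's two filter passes: the low predicate, and "not low and up" (A's branch priority).
def lowOkB (c : Char) : Bool := PySem.Chars.islower c || (c = '_' || c = '.')
def upOkB (c : Char) : Bool := PySem.Chars.isupper c || (c = ' ' || c = '|')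

def split_rec_alt (string : String) : String × String :=
  (String.ofList (string.toList.filter lowOkB),
   String.ofList (string.toList.filter (fun c => !lowOkB c && upOkB c)))

-- ===== PRECONDITION & SPEC =====
def Spec_split_rec (string : String) (out : String × String) : Prop := out = split_rec_alt string
instance (string : String) (out : String × String) : Decidable (Spec_split_rec string out) := by unfold Spec_split_rec; infer_instance

-- ===== CLAIM (what is proved, stated in full; the proofs are below) =====
def Claim_equal_split_rec : Prop := ∀ (string : String), Dom_split_rec string → Spec_split_rec string (split_rec string)

-- ===== LEMMAS AND PROOFS =====
theorem auxA_eq_filters (cs : List Char) :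
    splitRecAuxA cs = (cs.filter lowOkB, cs.filter (fun c => !lowOkB c && upOkB c)) := by
  induction cs with
  | nil => simp [splitRecAuxA]
  | cons c rest ih =>
    simp only [splitRecAuxA, ih, List.filter_cons, lowOkB, upOkB]
    split_ifs with h1 h2 <;> simp_all

-- ===== VERDICT (by name: the statement is the Claim_ definition above) =====
theorem split_rec_spec : Claim_equal_split_rec := by
  intro s _
  unfold Spec_split_rec split_rec split_rec_alt
  simp [auxA_eq_filters]
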